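-- pv_equiv track=rewrite | github.com/DongExxn/Algorithm | 프로그래머스/2/42626. 더 맵게/더 맵게.py | solution
-- ===== SOURCE A (Python) =====
-- import heapq
--
-- def solution(scoville, K):
--     answer = 0
--
--     heap = []
--     for i in scoville:
--         heapq.heappush(heap, i)
--
--     while heap[0] < K:
--         first = heapq.heappop(heap)
--         second = heapq.heappop(heap)
--
--         heapq.heappush(heap, first + (second * 2))
--         answer += 1
--
--         if len(heap) == 1 and heap[0] < K:
--             return -1
--     return answer
-- ===== SOURCE B (Python) =====
-- import bisect
--
-- def solution(scoville, K):
--     # sorted list consumed by an index pointer; merged values re-inserted by binary insertion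
--     lst = sorted(scoville)
--     i = 0
--     count = 0
--     while lst[i] < K:
--         if i == len(lst) - 1:
--             return -1
--         bisect.insort(lst, lst[i] + 2 * lst[i + 1], lo=i + 2)
--         i += 2
--         count += 1
--     return count
-- ===== Notes on version B (the rewrite author's own statement) =====
-- stated objective: alternative
-- what changed: Replaces the binary min-heap (heappush/heappop) by a single upfront sort consumed through an advancing index pointer, with each merged value re-inserted into the still-unread suffix by binary insertion (bisect.insort with lo), so no heap structure is ever maintained.
-- crash fix: On a one-element list whose element is below K, A raises IndexError (second heappop on an empty heap) while B returns -1 (no pair left to merge). — e.g. on solution([5], 10): A raises IndexError, B returns -1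
import Mathlib
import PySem

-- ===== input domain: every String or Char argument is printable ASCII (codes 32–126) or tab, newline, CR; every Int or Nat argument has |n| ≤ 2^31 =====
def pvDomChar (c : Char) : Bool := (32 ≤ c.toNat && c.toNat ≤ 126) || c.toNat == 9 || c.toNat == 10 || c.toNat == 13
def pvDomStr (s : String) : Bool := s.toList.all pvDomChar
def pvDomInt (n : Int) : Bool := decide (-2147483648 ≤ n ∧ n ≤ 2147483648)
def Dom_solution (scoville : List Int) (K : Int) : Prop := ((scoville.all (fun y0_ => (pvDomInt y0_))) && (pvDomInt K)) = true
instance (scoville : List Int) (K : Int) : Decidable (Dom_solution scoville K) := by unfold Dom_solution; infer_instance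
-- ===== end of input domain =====

-- B replaces A's binary heap by a sorted list consumed through an index pointer, with
-- merged values re-inserted by binary insertion (alternative decomposition, no speed claim).

-- ===== PORT A =====
-- heapq is ported by its contract (exact for Int elements, where equal values are
-- indistinguishable): heap[0] is the minimum, heappush adds, heappop removes one
-- minimal element.
def heapPush (h : List Int) (x : Int) : List Int := h ++ [x]

-- heap[0]: none exactly when the heap is empty (Python IndexError, excluded by Pre_)
def heapTop? (h : List Int) : Option Int := PySem.List.min? h (fun x => x)

-- heappop: removes one minimal element; (0, []) on the empty heap, where Python raises
def heapPop (h : List Int) : Int × List Int :=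
  match PySem.List.min? h (fun x => x) with
  | none => (0, [])
  | some m => (m, h.erase m)

-- A's while loop; the fuel only makes the recursion structural (scoville.length is enough)
def solutionLoop (K : Int) : Nat → List Int → Int → Int
  | 0, _, answer => answer
  | fuel+1, heap, answer =>
    match heapTop? heap with
    | none => answer          -- heap[0] on the empty heap: Python raises (outside Pre_)
    | some top =>
      if top < K then
        let p1 := heapPop heap
        let p2 := heapPop p1.2
        let heap2 := heapPush p2.2 (p1.1 + p2.1 * 2)
        if heap2.length = 1 ∧ heap2.headD 0 < K then -1
        else solutionLoop K fuel heap2 (answer + 1)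
      else answer

def solution (scoville : List Int) (K : Int) : Int :=
  let heap := scoville.foldl (fun h i => heapPush h i) []
  solutionLoop K scoville.length heap 0

-- ===== PORT B =====
-- bisect.insort(lst, v, lo=i+2) = insert v at the bisect_right position within lst[i+2:]
def solAltLoop (K : Int) : Nat → List Int → Nat → Int → Int
  | 0, _, _, count => count
  | fuel+1, lst, i, count =>
    if lst.getD i 0 < K then
      if i = lst.length - 1 then -1
      else
        let v := lst.getD i 0 + 2 * lst.getD (i+1) 0
        let rest := lst.drop (i+2)
        let lst' := lst.take (i+2) ++ rest.insertIdx (PySem.List.bisectRight rest v) v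
        solAltLoop K fuel lst' (i+2) (count+1)
    else count

def solution_alt (scoville : List Int) (K : Int) : Int :=
  solAltLoop K scoville.length (PySem.List.sorted scoville (fun x => x)) 0 0

-- ===== PRECONDITION & SPEC =====
-- Pre_ excludes exactly the inputs where A raises IndexError: the empty list (heap[0] on
-- an empty heap) and a single element below K (second heappop on an empty heap).
def Pre_solution (scoville : List Int) (K : Int) : Prop :=
  scoville ≠ [] ∧ (scoville.length = 1 → ∀ x ∈ scoville, K ≤ x)
instance (scoville : List Int) (K : Int) : Decidable (Pre_solution scoville K) := by
  unfold Pre_solution; infer_instance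
def pvWitness_solution : List Int × Int := ([1, 2, 3, 9, 10, 12], 7)

-- On a one-element list below K, A raises IndexError (second heappop on an empty heap); B returns -1.
def Raises_solution (scoville : List Int) (K : Int) : Prop :=
  scoville.length = 1 ∧ scoville.headD 0 < K
instance (scoville : List Int) (K : Int) : Decidable (Raises_solution scoville K) := by
  unfold Raises_solution; infer_instance
def pvRaiseWitness_solution : List Int × Int := ([5], 10)
def pvRaiseWitnessOut_solution : Int := -1

def Spec_solution (scoville : List Int) (K : Int) (out : Int) : Prop := out = solution_alt scoville K
instance (scoville : List Int) (K : Int) (out : Int) : Decidable (Spec_solution scoville K out) := by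
  unfold Spec_solution; infer_instance

-- ===== CLAIM (what is proved, stated in full; the proofs are below) =====
def Claim_equal_solution : Prop := ∀ (scoville : List Int) (K : Int), Dom_solution scoville K → Pre_solution scoville K → Spec_solution scoville K (solution scoville K)
def Claim_raises_solution : Prop := (∀ (scoville : List Int) (K : Int), Dom_solution scoville K → Raises_solution scoville K → ¬ Pre_solution scoville K) ∧ (Dom_solution (pvRaiseWitness_solution.1) (pvRaiseWitness_solution.2) ∧ Raises_solution (pvRaiseWitness_solution.1) (pvRaiseWitness_solution.2) ∧ solution_alt (pvRaiseWitness_solution.1) (pvRaiseWitness_solution.2) = pvRaiseWitnessOut_solution)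

-- ===== LEMMAS AND PROOFS =====

-- a list with the multiset of a sorted nonempty list has that list's head as its minimum
lemma min?_of_coe_sorted (h : List Int) (m : Int) (t : List Int)
    (hmeq : (↑h : Multiset Int) = ↑(m :: t))
    (hs : (m :: t).Pairwise (fun a b : Int => a ≤ b)) :
    PySem.List.min? h (fun x => x) = some m := by
  have hmemh : ∀ x : Int, x ∈ h ↔ x ∈ m :: t := by
    intro x; rw [← Multiset.mem_coe, hmeq, Multiset.mem_coe]
  cases hmin : PySem.List.min? h (fun x => x) with
  | none =>
      rw [PySem.List.min?_eq_none_iff] at hmin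
      subst hmin
      have := (hmemh m).mpr (List.mem_cons_self)
      simp at this
  | some m' =>
      have h1 : m' ∈ h := PySem.List.min?_mem hmin
      have h2 := PySem.List.min?_isMin hmin
      have hle : m' ≤ m := h2 m ((hmemh m).mpr (List.mem_cons_self))
      have hge : m ≤ m' := by
        rcases List.mem_cons.mp ((hmemh m').mp h1) with rfl | hmt
        · exact le_refl _
        · exact (List.pairwise_cons.mp hs).1 m' hmt
      have : m' = m := le_antisymm hle hge
      rw [this]

lemma insertIdx_take_drop {α : Type} (l : List α) (n : Nat) (a : α) (h : n ≤ l.length) :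
    l.insertIdx n a = l.take n ++ a :: l.drop n := by
  induction n generalizing l with
  | zero => simp [List.insertIdx]
  | succ n ih =>
      cases l with
      | nil => simp at h
      | cons x xs =>
          simp only [List.insertIdx_succ_cons, List.take_succ_cons, List.drop_succ_cons,
            List.cons_append]
          rw [ih xs (by simpa using h)]

lemma insort_sorted (l : List Int) (v : Int) (hs : l.Pairwise (fun a b : Int => a ≤ b)) :
    (l.insertIdx (PySem.List.bisectRight l v) v).Pairwise (fun a b : Int => a ≤ b) := by
  obtain ⟨hple, hlo, hhi⟩ := PySem.List.bisectRight_spec l v hs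
  set p := PySem.List.bisectRight l v with hp
  have htake : ∀ a ∈ l.take p, a ≤ v := by
    intro a ha
    obtain ⟨i, hi, hieq⟩ := List.mem_take_iff_getElem.mp ha
    exact hieq ▸ hlo i (lt_of_lt_of_le hi (by omega)) (by omega)
  have hdrop : ∀ b ∈ l.drop p, v < b := by
    intro b hb
    obtain ⟨i, hi, hieq⟩ := List.mem_drop_iff_getElem.mp hb
    exact hieq ▸ hhi (p + i) (by omega) (by omega)
  rw [insertIdx_take_drop l p v hple, List.pairwise_append]
  refine ⟨hs.sublist (List.take_sublist p l), ?_, ?_⟩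
  · rw [List.pairwise_cons]
    exact ⟨fun b hb => le_of_lt (hdrop b hb), hs.sublist (List.drop_sublist p l)⟩
  · intro a ha b hb
    rcases List.mem_cons.mp hb with rfl | hb'
    · exact htake a ha
    · exact le_trans (htake a ha) (le_of_lt (hdrop b hb'))

lemma insort_coe (l : List Int) (v : Int) (hle : PySem.List.bisectRight l v ≤ l.length) :
    (↑(l.insertIdx (PySem.List.bisectRight l v) v) : Multiset Int) = v ::ₘ ↑l :=
  Multiset.coe_eq_coe.mpr (List.perm_insertIdx v l hle)

-- the two loops agree on states representing the same multiset of scovilles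
lemma loop_eq (K : Int) : ∀ (fa fb : Nat) (h lst : List Int) (i : Nat) (ans : Int),
    h.length ≤ fa → h.length ≤ fb →
    i + h.length = lst.length →
    (lst.drop i).Pairwise (fun a b : Int => a ≤ b) →
    (↑h : Multiset Int) = ↑(lst.drop i) →
    h ≠ [] →
    (h.length = 1 → ∀ x ∈ h, K ≤ x) →
    solutionLoop K fa h ans = solAltLoop K fb lst i ans := by
  intro fa
  induction fa with
  | zero =>
      intro fb h lst i ans hfa _ _ _ _ hne _
      exact absurd (List.length_eq_zero_iff.mp (Nat.le_zero.mp hfa)) hne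
  | succ fa ih =>
      intro fb h lst i ans hfa hfb hil hs hm hne hP
      -- the remaining sorted segment
      have hlen : h.length = (lst.drop i).length := by
        have := congrArg Multiset.card hm
        simpa using this
      cases hr : lst.drop i with
      | nil => rw [hr] at hlen; simp at hlen; exact absurd hlen hne
      | cons m t =>
          rw [hr] at hs hm hlen
          have hmin : PySem.List.min? h (fun x => x) = some m := min?_of_coe_sorted h m t hm hs
          have hgetDi : lst.getD i 0 = m := by
            rw [List.getD_eq_getElem?_getD, ← List.head?_drop, hr]; rfl
          cases fb with
          | zero => exact absurd (List.length_eq_zero_iff.mp (Nat.le_zero.mp hfb)) hne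
          | succ fb =>
          by_cases htop : m < K
          · -- merge step: h has at least two elements
            have hpos : 0 < h.length := List.length_pos_iff.mpr hne
            have h2le : 2 ≤ h.length := by
              by_contra hcon
              have h1 : h.length = 1 := by omega
              have : K ≤ m := hP h1 m (by
                have : m ∈ h := by rw [← Multiset.mem_coe, hm]; exact Multiset.mem_coe.mpr List.mem_cons_self
                exact this)
              omega
            -- second smallest
            cases t with
            | nil => rw [List.length_cons, List.length_nil] at hlen; omega
            | cons m2 t2 =>
            have hmemm : m ∈ h := by rw [← Multiset.mem_coe, hm]; exact Multiset.mem_coe.mpr List.mem_cons_self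
            have hm1 : (↑(h.erase m) : Multiset Int) = ↑(m2 :: t2) := by
              rw [← Multiset.coe_erase, hm, ← Multiset.cons_coe, Multiset.erase_cons_head]
            have hs1 : (m2 :: t2).Pairwise (fun a b : Int => a ≤ b) := (List.pairwise_cons.mp hs).2
            have hmin1 : PySem.List.min? (h.erase m) (fun x => x) = some m2 :=
              min?_of_coe_sorted _ m2 t2 hm1 hs1
            have hmemm2 : m2 ∈ h.erase m := by
              rw [← Multiset.mem_coe, hm1]; exact Multiset.mem_coe.mpr List.mem_cons_self
            have hm2 : (↑((h.erase m).erase m2) : Multiset Int) = ↑t2 := by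
              rw [← Multiset.coe_erase, hm1, ← Multiset.cons_coe, Multiset.erase_cons_head]
            have hlen1 : (h.erase m).length = h.length - 1 := List.length_erase_of_mem hmemm
            have hlen2 : ((h.erase m).erase m2).length = h.length - 2 := by
              rw [List.length_erase_of_mem hmemm2, hlen1]; omega
            have hlent2 : t2.length = h.length - 2 := by
              have := congrArg Multiset.card hm2
              simpa [hlen2] using this.symm
            -- B's accessed values
            have hgetDi1 : lst.getD (i+1) 0 = m2 := by
              rw [List.getD_eq_getElem?_getD, ← List.head?_drop, ← List.tail_drop, hr]; rfl
            have hrest : lst.drop (i+2) = t2 := by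
              have : lst.drop (i+2) = (lst.drop i).drop 2 := by
                rw [List.drop_drop]
              rw [this, hr]; rfl
            -- the merged value
            set v : Int := m + 2 * m2 with hv
            have hvv : m + m2 * 2 = v := by omega
            set p := PySem.List.bisectRight t2 v with hpdef
            have hple : p ≤ t2.length := (PySem.List.bisectRight_spec t2 v hs1.of_cons).1
            set ins := t2.insertIdx p v with hins
            set lst' := lst.take (i+2) ++ ins with hlst'
            have htklen : (lst.take (i+2)).length = i + 2 := by
              rw [List.length_take]; omega
            have hdrop' : lst'.drop (i+2) = ins := List.drop_left' htklen
            have hinslen : ins.length = t2.length + 1 := by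
              rw [hins, List.length_insertIdx, if_pos hple]
            have hlstlen' : lst'.length = lst.length + 1 := by
              rw [hlst', List.length_append, htklen, hinslen]; omega
            have hins_sorted : ins.Pairwise (fun a b : Int => a ≤ b) := insort_sorted t2 v hs1.of_cons
            have hins_coe : (↑ins : Multiset Int) = v ::ₘ ↑t2 := insort_coe t2 v hple
            -- the new heap
            have hheap2 : (↑((h.erase m).erase m2 ++ [m + m2 * 2]) : Multiset Int) = ↑ins := by
              rw [hins_coe]
              calc (↑((h.erase m).erase m2 ++ [m + m2 * 2]) : Multiset Int)
                  = (↑((h.erase m).erase m2) : Multiset Int) + ↑([m + m2 * 2] : List Int) := by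
                    exact_mod_cast (Multiset.coe_add _ _).symm
                _ = ↑t2 + {v} := by rw [hm2, hvv, Multiset.coe_singleton]
                _ = v ::ₘ ↑t2 := by rw [add_comm, Multiset.singleton_add]
            have hheap2len : ((h.erase m).erase m2 ++ [m + m2 * 2]).length = h.length - 1 := by
              rw [List.length_append, hlen2]; simp; omega
            -- unfold A one step
            rw [solutionLoop]
            simp only [heapTop?, hmin]
            rw [if_pos htop]
            simp only [heapPop, hmin, hmin1, heapPush]
            -- unfold B one step
            rw [solAltLoop]
            rw [hgetDi, if_pos htop]
            have hinot : ¬ (i = lst.length - 1) := by omega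
            rw [if_neg hinot]
            show _ = solAltLoop K fb (lst.take (i+2) ++ (lst.drop (i+2)).insertIdx
                (PySem.List.bisectRight (lst.drop (i+2)) (m + 2 * lst.getD (i+1) 0))
                (m + 2 * lst.getD (i+1) 0)) (i+2) (ans+1)
            rw [hgetDi1, hrest, ← hv, ← hpdef, ← hins, ← hlst']
            -- both sides now step to the merged state
            by_cases hone : h.length = 2
            · -- merged heap has a single element
              have ht2nil : t2 = [] := List.length_eq_zero_iff.mp (by omega)
              have hh2nil : (h.erase m).erase m2 = [] := List.length_eq_zero_iff.mp (by omega)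
              subst ht2nil
              rw [hh2nil]
              simp only [List.nil_append]
              by_cases hlt : m + m2 * 2 < K
              · rw [if_pos (by constructor <;> simp [hlt])]
                -- B: one more loop iteration reaches lst'[i+2] = v < K with i+2 the last index
                cases fb with
                | zero => omega
                | succ fb =>
                    rw [solAltLoop]
                    have hpz : p = 0 := by omega
                    have hinseq : ins = [v] := by rw [hins, hpz]; rfl
                    have hget2 : lst'.getD (i+2) 0 = v := by
                      rw [List.getD_eq_getElem?_getD, ← List.head?_drop, hdrop', hinseq]; rfl
                    rw [hget2, if_pos (by omega)]
                    rw [if_pos (by rw [hlstlen']; omega)]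
              · rw [if_neg (by simp [hlt])]
                have hpz : p = 0 := by omega
                have hinseq : ins = [v] := by rw [hins, hpz]; rfl
                refine ih fb ([m + m2 * 2]) lst' (i+2) (ans+1) (by simp; omega) (by simp; omega)
                  (by rw [hlstlen']; simp; omega) ?_ ?_ (by simp) ?_
                · rw [hdrop', hinseq]; simp
                · rw [hdrop', hinseq]; simp; omega
                · intro _ x hx; simp at hx; subst hx; omega
            · -- merged heap still has ≥ 2 elements: no -1 check fires, recurse
              have h3 : 3 ≤ h.length := by omega
              rw [if_neg (by rw [hheap2len]; rintro ⟨hc, -⟩; omega)]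
              refine ih fb _ lst' (i+2) (ans+1) (by omega) (by omega)
                (by rw [hlstlen', hheap2len]; omega) ?_ ?_ ?_ ?_
              · rw [hdrop']; exact hins_sorted
              · rw [hdrop']; exact hheap2
              · intro hc; rw [← List.length_eq_zero_iff, hheap2len] at hc; omega
              · rw [hheap2len]; omega
          · -- head already ≥ K: both loops stop
            rw [solutionLoop, solAltLoop]
            simp only [heapTop?, hmin]
            rw [if_neg htop, hgetDi, if_neg htop]

lemma sorted_drop_zero (l : List Int) :
    ((PySem.List.sorted l (fun x : Int => x)).drop 0).Pairwise (fun a b : Int => a ≤ b) := by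
  simpa using PySem.List.sorted_pairwise l (fun x : Int => x)

-- ===== VERDICT (by name: the statement is the Claim_ definition above) =====
theorem solution_spec : Claim_equal_solution := by
  intro scoville K _ hpre
  unfold Spec_solution solution solution_alt
  simp only [heapPush]
  rw [PySem.List.foldl_append_singleton]
  simp only [List.nil_append]
  obtain ⟨hne, hone⟩ := hpre
  have hperm : (PySem.List.sorted scoville (fun x : Int => x) false).Perm scoville :=
    PySem.List.sorted_perm scoville (fun x => x) false
  exact loop_eq K scoville.length scoville.length scoville
    (PySem.List.sorted scoville (fun x => x)) 0 0 (le_refl _) (le_refl _)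
    (by simp [hperm.length_eq])
    (sorted_drop_zero scoville)
    (by simpa using (Multiset.coe_eq_coe.mpr hperm).symm)
    hne hone

@[simp] theorem solution_raises : Claim_raises_solution := by
  unfold Claim_raises_solution
  refine ⟨?_, by decide⟩
  intro scoville K _ hr hpre
  obtain ⟨hlen, hlt⟩ := hr
  obtain ⟨-, hone⟩ := hpre
  cases scoville with
  | nil => simp at hlen
  | cons a t =>
      have hKa : K ≤ a := hone (by simpa using hlen) a List.mem_cons_self
      simp [List.headD] at hlt
      omega
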